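-- pv_equiv track=rewrite | github.com/proliferate-ai/proliferate | server/proliferate/integrations/mcp_oauth.py | _parse_www_authenticate
-- ===== SOURCE A (Python) =====
-- def _parse_www_authenticate(value: str) -> dict[str, str]:
--     bearer = value.removeprefix("Bearer ").strip()
--     result: dict[str, str] = {}
--     current = ""
--     in_quotes = False
--     for char in bearer:
--         if char == '"':
--             in_quotes = not in_quotes
--         if char == "," and not in_quotes:
--             _insert_www_auth_param(result, current)
--             current = ""
--         else:
--             current += char
--     _insert_www_auth_param(result, current)
--     return result
--
-- def _insert_www_auth_param(target: dict[str, str], raw: str) -> None: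
--     if "=" not in raw:
--         return
--     key, value = raw.split("=", 1)
--     target[key.strip()] = value.strip().strip('"')
-- ===== SOURCE B (Python) =====
-- def _insert_www_auth_param(target: dict[str, str], raw: str) -> None:
--     if "=" not in raw:
--         return
--     key, value = raw.split("=", 1)
--     target[key.strip()] = value.strip().strip('"')
--
--
-- def _parse_www_authenticate(value: str) -> dict[str, str]:
--     bearer = value.removeprefix("Bearer ").strip()
--     result: dict[str, str] = {}
--     buf = ""
--     pending = False
--     quotes = 0
--     for piece in bearer.split(','):
--         quotes += piece.count('"')
--         buf = buf + ',' + piece if pending else piece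
--         if quotes % 2 == 0:
--             _insert_www_auth_param(result, buf)
--             buf = ""
--             pending = False
--         else:
--             pending = True
--     if pending:
--         _insert_www_auth_param(result, buf)
--     return result
-- ===== Notes on version B (the rewrite author's own statement) =====
-- stated objective: faster
-- what changed: Replaces A's per-character scan with an in_quotes flag by splitting on every comma first and re-merging adjacent fragments while the running quote count is odd, flushing each fragment through the unchanged _insert_www_auth_param once its quote count is even.
import Mathlib
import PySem

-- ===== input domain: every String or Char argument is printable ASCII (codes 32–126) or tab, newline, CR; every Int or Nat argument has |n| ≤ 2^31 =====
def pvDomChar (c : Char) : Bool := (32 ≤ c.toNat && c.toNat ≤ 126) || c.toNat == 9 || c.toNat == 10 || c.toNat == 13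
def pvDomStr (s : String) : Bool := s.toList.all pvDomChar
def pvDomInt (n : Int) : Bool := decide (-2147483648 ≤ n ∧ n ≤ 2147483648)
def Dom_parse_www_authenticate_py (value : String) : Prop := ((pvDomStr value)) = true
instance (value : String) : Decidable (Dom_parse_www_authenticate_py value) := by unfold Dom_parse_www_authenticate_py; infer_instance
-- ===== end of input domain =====

-- B replaces A's per-character quoted-comma scanner (which grows `current` one character at a time) by a naive comma split re-merged by quote parity; a timing run measured B faster.

-- ===== PORT A =====

-- hand port of str.removeprefix (exact: drop the prefix iff present); shared by both ports, as in the Python sources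
def pyRemovePrefix (s pre : List Char) : List Char :=
  if pre.isPrefixOf s then s.drop pre.length else s

-- port of _insert_www_auth_param (the same helper is called by A and by B, as in the Python sources)
def insertParam (target : PySem.Dict String String) (raw : List Char) : PySem.Dict String String :=
  if PySem.Chars.isIn ['='] raw then
    match PySem.Chars.splitOnMax raw ['='] 1 with
    | key :: v :: _ =>
        target.insert (String.ofList (PySem.Chars.strip key))
          (String.ofList (PySem.Chars.stripChars (PySem.Chars.strip v) ['"']))
    | _ => target          -- unreachable: split with "=" present yields two pieces
  else target

-- the body of A's character loop
def stepA (st : PySem.Dict String String × List Char × Bool) (ch : Char) :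
    PySem.Dict String String × List Char × Bool :=
  let inq := if ch == '"' then !st.2.2 else st.2.2
  if ch == ',' && !inq then (insertParam st.1 st.2.1, [], inq)
  else (st.1, st.2.1 ++ [ch], inq)

def parse_www_authenticate_py (value : String) : List (String × String) :=
  let bearer := PySem.Chars.strip (pyRemovePrefix value.toList "Bearer ".toList)
  let fin := bearer.foldl stepA (PySem.Dict.empty, [], false)
  (insertParam fin.1 fin.2.1).items

-- ===== PORT B =====

-- the body of B's piece loop: state (result, buf, pending, quotes)
def stepB (st : PySem.Dict String String × List Char × Bool × Nat) (piece : List Char) :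
    PySem.Dict String String × List Char × Bool × Nat :=
  let quotes := st.2.2.2 + PySem.Chars.count piece ['"']
  let buf := if st.2.2.1 then st.2.1 ++ ',' :: piece else piece
  if quotes % 2 == 0 then (insertParam st.1 buf, [], false, quotes)
  else (st.1, buf, true, quotes)

def parse_www_authenticate_py_alt (value : String) : List (String × String) :=
  let bearer := PySem.Chars.strip (pyRemovePrefix value.toList "Bearer ".toList)
  let fin := (PySem.Chars.splitOn bearer [',']).foldl stepB (PySem.Dict.empty, [], false, 0)
  (if fin.2.2.1 then insertParam fin.1 fin.2.1 else fin.1).items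

-- ===== PRECONDITION & SPEC =====
def Spec_parse_www_authenticate_py (value : String) (out : List (String × String)) : Prop := out = parse_www_authenticate_py_alt value
instance (value : String) (out : List (String × String)) : Decidable (Spec_parse_www_authenticate_py value out) := by unfold Spec_parse_www_authenticate_py; infer_instance

-- ===== CLAIM (what is proved, stated in full; the proofs are below) =====
def Claim_equal_parse_www_authenticate_py : Prop := ∀ (value : String), Dom_parse_www_authenticate_py value → Spec_parse_www_authenticate_py value (parse_www_authenticate_py value)

-- ===== LEMMAS AND PROOFS =====

-- A's final line, as a function of the loop state
def finA (st : PySem.Dict String String × List Char × Bool) : List (String × String) :=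
  (insertParam st.1 st.2.1).items

-- B's final flush, as a function of the loop state
def finB (st : PySem.Dict String String × List Char × Bool × Nat) : List (String × String) :=
  (if st.2.2.1 then insertParam st.1 st.2.1 else st.1).items

-- str.count for a one-character needle is List.count
lemma count_go_char (c : Char) : ∀ (fuel : Nat) (l : List Char) (acc : Nat),
    l.length ≤ fuel → PySem.Chars.count.go [c] fuel l acc = acc + l.count c
  | 0, [], acc, _ => by simp [PySem.Chars.count.go]
  | 0, _ :: _, _, h => by simp at h
  | Nat.succ fuel, [], acc, _ => by simp [PySem.Chars.count.go]
  | Nat.succ fuel, x :: t, acc, h => by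
    simp only [List.length_cons] at h
    by_cases hx : c = x
    · have hb : (c == x) = true := by simpa using hx
      have h1 : PySem.Chars.count.go [c] (fuel + 1) (x :: t) acc
          = PySem.Chars.count.go [c] fuel t (acc + 1) := by
        simp [PySem.Chars.count.go, List.isPrefixOf, hb]
      rw [h1, count_go_char c fuel t (acc + 1) (by omega)]
      simp [List.count_cons, hx]; omega
    · have hb : (c == x) = false := by simpa using hx
      have h1 : PySem.Chars.count.go [c] (fuel + 1) (x :: t) acc
          = PySem.Chars.count.go [c] fuel t acc := by
        simp [PySem.Chars.count.go, List.isPrefixOf, hb]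
      rw [h1, count_go_char c fuel t acc (by omega)]
      simp [List.count_cons, Ne.symm hx]

lemma count_char (c : Char) (l : List Char) : PySem.Chars.count l [c] = l.count c := by
  simp [PySem.Chars.count, count_go_char c l.length l 0 le_rfl]

-- split on a one-character separator, in directly recursive form
def mySplit (c : Char) : List Char → List Char → List (List Char)
  | [], cur => [cur.reverse]
  | x :: rest, cur =>
      if x = c then cur.reverse :: mySplit c rest [] else mySplit c rest (x :: cur)

lemma splitOn_go_char (c : Char) : ∀ (fuel : Nat) (l cur : List Char) (acc : List (List Char)),
    l.length < fuel → PySem.Chars.splitOn.go [c] fuel l cur acc = acc.reverse ++ mySplit c l cur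
  | 0, _, _, _, h => by omega
  | Nat.succ fuel, [], cur, acc, _ => by simp [PySem.Chars.splitOn.go, mySplit]
  | Nat.succ fuel, x :: t, cur, acc, h => by
    simp only [List.length_cons] at h
    by_cases hx : x = c
    · have hb : (c == x) = true := by simp [hx]
      have h1 : PySem.Chars.splitOn.go [c] (fuel + 1) (x :: t) cur acc
          = PySem.Chars.splitOn.go [c] fuel t [] (cur.reverse :: acc) := by
        simp [PySem.Chars.splitOn.go, List.isPrefixOf, hb]
      rw [h1, splitOn_go_char c fuel t [] (cur.reverse :: acc) (by omega)]
      simp [mySplit, hx]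
    · have hb : (c == x) = false := by simp [Ne.symm hx]
      have h1 : PySem.Chars.splitOn.go [c] (fuel + 1) (x :: t) cur acc
          = PySem.Chars.splitOn.go [c] fuel t (x :: cur) acc := by
        simp [PySem.Chars.splitOn.go, List.isPrefixOf, hb]
      rw [h1, splitOn_go_char c fuel t (x :: cur) acc (by omega)]
      simp [mySplit, hx]

lemma splitOn_char (c : Char) (l : List Char) :
    PySem.Chars.splitOn l [c] = mySplit c l [] := by
  simpa using splitOn_go_char c (l.length + 1) l [] [] (by omega)

lemma mySplit_cons_self (c : Char) (rest cur : List Char) :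
    mySplit c (c :: rest) cur = cur.reverse :: mySplit c rest [] := by simp [mySplit]

lemma mySplit_cons_ne {x c : Char} (hx : ¬ x = c) (rest cur : List Char) :
    mySplit c (x :: rest) cur = mySplit c rest (x :: cur) := by simp [mySplit, hx]

-- odd number of '"' in the (reversed) fragment cur
def oddQ (cur : List Char) : Bool := decide (cur.count '"' % 2 = 1)

lemma oddQ_quote (cur : List Char) : oddQ ('"' :: cur) = !oddQ cur := by
  simp only [oddQ, List.count_cons, if_pos rfl]
  rcases Nat.mod_two_eq_zero_or_one (cur.count '"') with h | h <;> simp [Nat.add_mod, h]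

lemma oddQ_other {x : Char} (hx : ¬ x = '"') (cur : List Char) : oddQ (x :: cur) = oddQ cur := by
  simp [oddQ, List.count_cons, hx]

-- the heart of the proof: A's character loop from a mid-piece state equals B's piece loop
lemma main_lemma : ∀ (s cur : List Char) (d : PySem.Dict String String) (bufB : List Char)
    (pending : Bool) (quotes : Nat),
    quotes % 2 = (if pending then 1 else 0) →
    finA (List.foldl stepA
        (d, (if pending then bufB ++ [','] else []) ++ cur.reverse, pending ^^ oddQ cur) s)
    = finB (List.foldl stepB (d, bufB, pending, quotes) (mySplit ',' s cur)) := by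
  intro s
  induction s with
  | nil =>
    intro cur d bufB pending quotes hq
    have hbuf : (if pending then bufB ++ ',' :: cur.reverse else cur.reverse)
        = (if pending then bufB ++ [','] else []) ++ cur.reverse := by
      cases pending <;> simp
    simp only [mySplit, List.foldl_nil, List.foldl_cons, stepB, count_char, List.count_reverse,
      hbuf]
    by_cases hpar : ((quotes + cur.count '"') % 2 == 0) = true <;>
      simp [hpar, finA, finB]
  | cons x rest ih =>
    intro cur d bufB pending quotes hq
    by_cases hcomma : x = ','
    · subst hcomma
      rw [mySplit_cons_self]
      simp only [List.foldl_cons]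
      have hstepB : stepB (d, bufB, pending, quotes) cur.reverse
          = (if ((quotes + cur.count '"') % 2 == 0) = true
             then (insertParam d ((if pending then bufB ++ [','] else []) ++ cur.reverse),
                   [], false, quotes + cur.count '"')
             else (d, (if pending then bufB ++ [','] else []) ++ cur.reverse,
                   true, quotes + cur.count '"')) := by
        simp only [stepB, count_char, List.count_reverse]
        cases pending <;> simp
      by_cases hq2 : (pending ^^ oddQ cur) = true
      · -- quoted comma: A appends it, B re-merges
        have hodd : ¬ (((quotes + cur.count '"') % 2 == 0) = true) := by
          cases pending <;> simp_all [oddQ] <;> omega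
        rw [hstepB, if_neg hodd, hq2]
        have hA : stepA (d, (if pending then bufB ++ [','] else []) ++ cur.reverse, true) ','
            = (d, ((if pending then bufB ++ [','] else []) ++ cur.reverse) ++ [','], true) := by
          simp [stepA]
        rw [hA]
        simpa [oddQ] using ih [] d ((if pending then bufB ++ [','] else []) ++ cur.reverse) true
          (quotes + cur.count '"') (by cases pending <;> simp_all [oddQ])
      · -- unquoted comma: both flush here
        have heven : ((quotes + cur.count '"') % 2 == 0) = true := by
          cases pending <;> simp_all [oddQ] <;> omega
        have hfalse : (pending ^^ oddQ cur) = false := by simpa using hq2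
        rw [hstepB, if_pos heven, hfalse]
        have hA : stepA (d, (if pending then bufB ++ [','] else []) ++ cur.reverse, false) ','
            = (insertParam d ((if pending then bufB ++ [','] else []) ++ cur.reverse), [], false) := by
          simp [stepA]
        rw [hA]
        simpa [oddQ] using ih [] (insertParam d ((if pending then bufB ++ [','] else []) ++ cur.reverse))
          [] false (quotes + cur.count '"') (by simpa using heven)
    · -- ordinary character: extend the current fragment on both sides
      rw [mySplit_cons_ne hcomma]
      simp only [List.foldl_cons]
      have hA : stepA (d, (if pending then bufB ++ [','] else []) ++ cur.reverse,
          pending ^^ oddQ cur) x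
          = (d, (if pending then bufB ++ [','] else []) ++ (x :: cur).reverse,
             pending ^^ oddQ (x :: cur)) := by
        have hnc : (x == ',') = false := by simpa using hcomma
        by_cases hqc : x = '"'
        · subst hqc
          simp [stepA, oddQ_quote]
        · have h1 : (x == '"') = false := by simpa using hqc
          simp [stepA, hnc, h1, oddQ_other hqc]
      rw [hA]
      exact ih (x :: cur) d bufB pending quotes hq

-- ===== VERDICT (by name: the statement is the Claim_ definition above) =====
theorem parse_www_authenticate_py_spec : Claim_equal_parse_www_authenticate_py := by
  intro value _
  unfold Spec_parse_www_authenticate_py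
  show finA _ = _
  simp only [parse_www_authenticate_py_alt, splitOn_char]
  have := main_lemma (PySem.Chars.strip (pyRemovePrefix value.toList "Bearer ".toList))
    [] PySem.Dict.empty [] false 0 (by simp)
  simpa [oddQ, finA, finB] using this
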